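-- pv_equiv track=rewrite | github.com/Digital-Physics/algos_python_etc | min_competitions_needed.py | min_comp_count
-- ===== SOURCE A (Python) =====
-- def min_comp_count(s: list[int]) -> int:
--     """get the minimum number of competitions (worth either 1 or 2) based on scoreboard totals inference"""
--     largest_even = 0
--     largest_odd = 0
--     min_comps_needed_even = 0
--     min_comps_needed_odd = 0
--
--     for num in s:
--         if num % 2 == 0 and num > largest_even:
--             min_comps_needed_even = int(num / 2)
--             largest_even = num
--         elif num % 2 == 1 and num > largest_odd:
--             min_comps_needed_odd = int(num // 2 + 1)
--             largest_odd = num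
--
--     if largest_even > largest_odd:
--         if largest_odd != 0:
--             return min_comps_needed_even + 1
--         else:
--             return min_comps_needed_even
--     else:
--         return min_comps_needed_odd
-- ===== SOURCE B (Python) =====
-- def min_comp_count(s: list[int]) -> int:
--     """get the minimum number of competitions (worth either 1 or 2) based on scoreboard totals inference"""
--     t = sorted(s, reverse=True)
--     largest_even = next((x for x in t if x > 0 and x % 2 == 0), 0)
--     largest_odd = next((x for x in t if x > 0 and x % 2 == 1), 0)
--     if largest_even > largest_odd:
--         return largest_even // 2 + (1 if largest_odd else 0)
--     return largest_odd // 2 + 1 if largest_odd else 0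
-- ===== Notes on version B (the rewrite author's own statement) =====
-- stated objective: alternative
-- what changed: A's single-pass loop tracking largest even/odd and their competition counts in four coupled variables is replaced by sorting descending and picking the first strictly-positive even and first strictly-positive odd element, then computing the counts from those two maxima.
import Mathlib
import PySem

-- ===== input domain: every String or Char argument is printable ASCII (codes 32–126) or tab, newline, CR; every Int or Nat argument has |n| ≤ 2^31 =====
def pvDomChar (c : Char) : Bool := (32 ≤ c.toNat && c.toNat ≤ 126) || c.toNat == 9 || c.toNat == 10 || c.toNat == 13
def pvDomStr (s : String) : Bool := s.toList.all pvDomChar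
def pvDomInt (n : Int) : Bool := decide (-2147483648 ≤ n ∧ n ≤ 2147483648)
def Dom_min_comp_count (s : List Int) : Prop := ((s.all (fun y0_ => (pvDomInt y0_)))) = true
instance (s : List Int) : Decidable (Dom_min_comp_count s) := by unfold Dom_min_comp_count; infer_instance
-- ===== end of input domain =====

-- B replaces A's single-pass max-tracking loop by sort-descending-then-pick-first-match; objective: alternative decomposition, not speed.


-- ===== PORT A =====
-- state = (largest_even, largest_odd, min_comps_needed_even, min_comps_needed_odd)
-- int(num / 2) is ported as PySem.Int.truncdiv num 2: exact for |num| ≤ 2^31 < 2^53 (the stated domain)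
def pvStepA (st : Int × Int × Int × Int) (num : Int) : Int × Int × Int × Int :=
  if PySem.Int.mod num 2 = 0 ∧ st.1 < num then (num, st.2.1, PySem.Int.truncdiv num 2, st.2.2.2)
  else if PySem.Int.mod num 2 = 1 ∧ st.2.1 < num then (st.1, num, st.2.2.1, PySem.Int.floordiv num 2 + 1)
  else st

def min_comp_count (s : List Int) : Int :=
  let r := s.foldl pvStepA (0, 0, 0, 0)
  if r.2.1 < r.1 then (if r.2.1 ≠ 0 then r.2.2.1 + 1 else r.2.2.1) else r.2.2.2

-- ===== PORT B =====
def min_comp_count_alt (s : List Int) : Int :=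
  let t := PySem.List.sorted s (fun x => x) true
  let le := (t.find? (fun x => decide (0 < x) && decide (PySem.Int.mod x 2 = 0))).getD 0
  let lo := (t.find? (fun x => decide (0 < x) && decide (PySem.Int.mod x 2 = 1))).getD 0
  if lo < le then PySem.Int.floordiv le 2 + (if lo ≠ 0 then 1 else 0)
  else if lo ≠ 0 then PySem.Int.floordiv lo 2 + 1 else 0

-- ===== PRECONDITION & SPEC =====
def Spec_min_comp_count (s : List Int) (out : Int) : Prop := out = min_comp_count_alt s
instance (s : List Int) (out : Int) : Decidable (Spec_min_comp_count s out) := by unfold Spec_min_comp_count; infer_instance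

-- ===== CLAIM (what is proved, stated in full; the proofs are below) =====
def Claim_equal_min_comp_count : Prop := ∀ (s : List Int), Dom_min_comp_count s → Spec_min_comp_count s (min_comp_count s)

-- ===== LEMMAS AND PROOFS =====

-- "r is the maximum element of s satisfying p, with default 0 when every p-element is ≤ 0"
def pvIsBest (p : Int → Prop) (s : List Int) (r : Int) : Prop :=
  (r = 0 ∧ ∀ x ∈ s, p x → x ≤ 0) ∨ (r ∈ s ∧ p r ∧ 0 < r ∧ ∀ x ∈ s, p x → x ≤ r)

theorem pvIsBest_unique {p : Int → Prop} {s : List Int} {r₁ r₂ : Int}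
    (h₁ : pvIsBest p s r₁) (h₂ : pvIsBest p s r₂) : r₁ = r₂ := by
  rcases h₁ with ⟨e₁, b₁⟩ | ⟨m₁, p₁, pos₁, b₁⟩ <;> rcases h₂ with ⟨e₂, b₂⟩ | ⟨m₂, p₂, pos₂, b₂⟩
  · omega
  · have := b₁ r₂ m₂ p₂; omega
  · have := b₂ r₁ m₁ p₁; omega
  · have := b₁ r₂ m₂ p₂; have := b₂ r₁ m₁ p₁; omega

-- the generic running-max step of A's loop
def pvBestFrom (p : Int → Prop) [DecidablePred p] (a : Int) (s : List Int) : Int :=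
  s.foldl (fun a x => if p x ∧ a < x then x else a) a

theorem pvBestFrom_spec (p : Int → Prop) [DecidablePred p] (s : List Int) : ∀ a : Int,
    (pvBestFrom p a s = a ∧ ∀ x ∈ s, p x → x ≤ a) ∨
    (pvBestFrom p a s ∈ s ∧ p (pvBestFrom p a s) ∧ a < pvBestFrom p a s ∧
      ∀ x ∈ s, p x → x ≤ pvBestFrom p a s) := by
  induction s with
  | nil => intro a; exact Or.inl ⟨rfl, by simp⟩
  | cons x t ih =>
    intro a
    by_cases hx : p x ∧ a < x
    · have hstep : pvBestFrom p a (x :: t) = pvBestFrom p x t := by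
        simp [pvBestFrom, hx]
      rcases ih x with ⟨he, hb⟩ | ⟨hm, hp, hlt, hb⟩
      · right
        refine ⟨by rw [hstep, he]; exact List.mem_cons_self, by rw [hstep, he]; exact hx.1,
          by rw [hstep, he]; exact hx.2, ?_⟩
        intro y hy hpy
        rcases List.mem_cons.1 hy with rfl | hyt
        · rw [hstep, he]
        · have := hb y hyt hpy; rw [hstep, he]; omega
      · right
        rw [hstep]
        refine ⟨List.mem_cons_of_mem _ hm, hp, by omega, ?_⟩
        intro y hy hpy
        rcases List.mem_cons.1 hy with rfl | hyt
        · omega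
        · exact hb y hyt hpy
    · have hstep : pvBestFrom p a (x :: t) = pvBestFrom p a t := by
        simp [pvBestFrom, hx]
      rcases ih a with ⟨he, hb⟩ | ⟨hm, hp, hlt, hb⟩
      · left
        refine ⟨by rw [hstep, he], ?_⟩
        intro y hy hpy
        rcases List.mem_cons.1 hy with rfl | hyt
        · have : ¬ a < y := fun h => hx ⟨hpy, h⟩
          omega
        · exact hb y hyt hpy
      · right
        rw [hstep]
        refine ⟨List.mem_cons_of_mem _ hm, hp, hlt, ?_⟩
        intro y hy hpy
        rcases List.mem_cons.1 hy with rfl | hyt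
        · have : ¬ a < y := fun h => hx ⟨hpy, h⟩
          omega
        · exact hb y hyt hpy


theorem pvBestFrom_isBest (p : Int → Prop) [DecidablePred p] (s : List Int) :
    pvIsBest (fun x => p x ∧ 0 < x) s (pvBestFrom p 0 s) := by
  rcases pvBestFrom_spec p s 0 with ⟨he, hb⟩ | ⟨hm, hp, hlt, hb⟩
  · exact Or.inl ⟨he, fun x hx hpx => hb x hx hpx.1⟩
  · exact Or.inr ⟨hm, ⟨hp, hlt⟩, hlt, fun x hx hpx => hb x hx hpx.1⟩

-- the first element of a descending list satisfying q is its maximum q-element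
theorem pvFind_isBest (q : Int → Bool) (t : List Int)
    (hsort : t.Pairwise (fun a b => b ≤ a)) :
    pvIsBest (fun x => q x = true ∧ 0 < x) t ((t.find? (fun x => decide (0 < x) && q x)).getD 0) := by
  induction t with
  | nil => exact Or.inl ⟨rfl, by simp⟩
  | cons x t ih =>
    rcases List.pairwise_cons.1 hsort with ⟨hx, ht⟩
    by_cases h : (decide (0 < x) && q x) = true
    · have hfind : ((x :: t).find? (fun x => decide (0 < x) && q x)).getD 0 = x := by
        simp [h]
      rw [hfind]
      simp only [Bool.and_eq_true, decide_eq_true_eq] at h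
      refine Or.inr ⟨List.mem_cons_self, ⟨h.2, h.1⟩, h.1, ?_⟩
      intro y hy hpy
      rcases List.mem_cons.1 hy with rfl | hyt
      · exact le_refl y
      · exact hx y hyt
    · have hfind : ((x :: t).find? (fun x => decide (0 < x) && q x))
          = t.find? (fun x => decide (0 < x) && q x) := by
        simp [h]
      rw [hfind]
      simp only [Bool.and_eq_true, decide_eq_true_eq, not_and] at h
      rcases ih ht with ⟨he, hb⟩ | ⟨hm, hp, hpos, hb⟩
      · refine Or.inl ⟨he, ?_⟩
        intro y hy hpy
        rcases List.mem_cons.1 hy with rfl | hyt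
        · exact absurd hpy.1 (h hpy.2)
        · exact hb y hyt hpy
      · refine Or.inr ⟨List.mem_cons_of_mem _ hm, hp, hpos, ?_⟩
        intro y hy hpy
        rcases List.mem_cons.1 hy with rfl | hyt
        · exact absurd hpy.1 (h hpy.2)
        · exact hb y hyt hpy


theorem pvTruncdiv_eq_floordiv {a : Int} (h : 0 ≤ a) :
    PySem.Int.truncdiv a 2 = PySem.Int.floordiv a 2 := by
  show a.tdiv 2 = a.fdiv 2
  rw [Int.tdiv_eq_ediv_of_nonneg h, Int.fdiv_eq_ediv_of_nonneg a (by norm_num)]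

-- one cons step of the generic running max
theorem pvBestFrom_cons (p : Int → Prop) [DecidablePred p] (a x : Int) (t : List Int) :
    pvBestFrom p a (x :: t) = pvBestFrom p (if p x ∧ a < x then x else a) t := rfl

-- the coupled state of A's loop, decomposed into two independent running maxima
theorem pvFoldA_spec (s : List Int) : ∀ le lo mce mco : Int,
    (s.foldl pvStepA (le, lo, mce, mco)).1 = pvBestFrom (fun x => PySem.Int.mod x 2 = 0) le s ∧
    (s.foldl pvStepA (le, lo, mce, mco)).2.1 = pvBestFrom (fun x => PySem.Int.mod x 2 = 1) lo s ∧
    (s.foldl pvStepA (le, lo, mce, mco)).2.2.1 =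
      (if (s.foldl pvStepA (le, lo, mce, mco)).1 = le then mce
       else PySem.Int.truncdiv (s.foldl pvStepA (le, lo, mce, mco)).1 2) ∧
    (s.foldl pvStepA (le, lo, mce, mco)).2.2.2 =
      (if (s.foldl pvStepA (le, lo, mce, mco)).2.1 = lo then mco
       else PySem.Int.floordiv (s.foldl pvStepA (le, lo, mce, mco)).2.1 2 + 1) ∧
    le ≤ (s.foldl pvStepA (le, lo, mce, mco)).1 ∧ lo ≤ (s.foldl pvStepA (le, lo, mce, mco)).2.1 := by
  induction s with
  | nil => intro le lo mce mco; simp [pvBestFrom]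
  | cons num t ih =>
    intro le lo mce mco
    by_cases hb1 : PySem.Int.mod num 2 = 0 ∧ le < num
    · have hno : ¬ (PySem.Int.mod num 2 = 1 ∧ lo < num) := by
        have := hb1.1; intro hc; have := hc.1; omega
      have hfold : (num :: t).foldl pvStepA (le, lo, mce, mco)
          = t.foldl pvStepA (num, lo, PySem.Int.truncdiv num 2, mco) := by
        rw [List.foldl_cons]
        congr 1
        simp only [pvStepA]
        rw [if_pos hb1]
      obtain ⟨h1, h2, h3, h4, h5, h6⟩ := ih num lo (PySem.Int.truncdiv num 2) mco
      rw [hfold]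
      refine ⟨by rw [h1, pvBestFrom_cons, if_pos hb1],
        by rw [h2, pvBestFrom_cons, if_neg hno], ?_, h4, by omega, h6⟩
      rw [h3]
      rw [if_neg (by omega : ¬ (t.foldl pvStepA (num, lo, PySem.Int.truncdiv num 2, mco)).1 = le)]
      by_cases heq : (t.foldl pvStepA (num, lo, PySem.Int.truncdiv num 2, mco)).1 = num
      · rw [if_pos heq, heq]
      · rw [if_neg heq]
    · by_cases hb2 : PySem.Int.mod num 2 = 1 ∧ lo < num
      · have hfold : (num :: t).foldl pvStepA (le, lo, mce, mco)
            = t.foldl pvStepA (le, num, mce, PySem.Int.floordiv num 2 + 1) := by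
          rw [List.foldl_cons]
          congr 1
          simp only [pvStepA]
          rw [if_neg hb1, if_pos hb2]
        obtain ⟨h1, h2, h3, h4, h5, h6⟩ := ih le num mce (PySem.Int.floordiv num 2 + 1)
        rw [hfold]
        refine ⟨by rw [h1, pvBestFrom_cons, if_neg hb1],
          by rw [h2, pvBestFrom_cons, if_pos hb2], h3, ?_, h5, by omega⟩
        rw [h4]
        rw [if_neg (by omega : ¬ (t.foldl pvStepA (le, num, mce, PySem.Int.floordiv num 2 + 1)).2.1 = lo)]
        by_cases heq : (t.foldl pvStepA (le, num, mce, PySem.Int.floordiv num 2 + 1)).2.1 = num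
        · rw [if_pos heq, heq]
        · rw [if_neg heq]
      · have hfold : (num :: t).foldl pvStepA (le, lo, mce, mco)
            = t.foldl pvStepA (le, lo, mce, mco) := by
          rw [List.foldl_cons]
          congr 1
          simp only [pvStepA]
          rw [if_neg hb1, if_neg hb2]
        obtain ⟨h1, h2, h3, h4, h5, h6⟩ := ih le lo mce mco
        rw [hfold]
        exact ⟨by rw [h1, pvBestFrom_cons, if_neg hb1],
          by rw [h2, pvBestFrom_cons, if_neg hb2], h3, h4, h5, h6⟩

theorem pvIsBest_congr {p p' : Int → Prop} (h : ∀ x, p x ↔ p' x) (s : List Int) (r : Int) :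
    pvIsBest p s r ↔ pvIsBest p' s r := by
  unfold pvIsBest
  simp only [h]

theorem pvIsBest_sorted (p : Int → Prop) (s : List Int) (r : Int) :
    pvIsBest p (PySem.List.sorted s (fun x => x) true) r ↔ pvIsBest p s r := by
  unfold pvIsBest
  simp [PySem.List.mem_sorted]

-- ===== VERDICT (by name: the statement is the Claim_ definition above) =====
theorem min_comp_count_spec : Claim_equal_min_comp_count := by
  intro s _
  show min_comp_count s = min_comp_count_alt s
  obtain ⟨h1, h2, h3, h4, h5, h6⟩ := pvFoldA_spec s 0 0 0 0
  -- A-side maxima are the maxima of the positive even / odd elements of s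
  have hAe := pvBestFrom_isBest (fun x => PySem.Int.mod x 2 = 0) s
  have hAo := pvBestFrom_isBest (fun x => PySem.Int.mod x 2 = 1) s
  -- B-side first matches in the descending sort are the same maxima
  have hsort : (PySem.List.sorted s (fun x => x) true).Pairwise (fun a b => b ≤ a) :=
    PySem.List.sorted_pairwise_rev s (fun x => x)
  have hEe : pvBestFrom (fun x => PySem.Int.mod x 2 = 0) 0 s
      = ((PySem.List.sorted s (fun x => x) true).find?
          (fun x => decide (0 < x) && decide (PySem.Int.mod x 2 = 0))).getD 0 :=
    pvIsBest_unique hAe ((pvIsBest_sorted _ s _).1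
      ((pvIsBest_congr (p := fun x => decide (PySem.Int.mod x 2 = 0) = true ∧ 0 < x)
        (p' := fun x => PySem.Int.mod x 2 = 0 ∧ 0 < x) (fun x => by simp) _ _).1
        (pvFind_isBest (fun x => decide (PySem.Int.mod x 2 = 0)) _ hsort)))
  have hEo : pvBestFrom (fun x => PySem.Int.mod x 2 = 1) 0 s
      = ((PySem.List.sorted s (fun x => x) true).find?
          (fun x => decide (0 < x) && decide (PySem.Int.mod x 2 = 1))).getD 0 :=
    pvIsBest_unique hAo ((pvIsBest_sorted _ s _).1
      ((pvIsBest_congr (p := fun x => decide (PySem.Int.mod x 2 = 1) = true ∧ 0 < x)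
        (p' := fun x => PySem.Int.mod x 2 = 1 ∧ 0 < x) (fun x => by simp) _ _).1
        (pvFind_isBest (fun x => decide (PySem.Int.mod x 2 = 1)) _ hsort)))
  have hA : min_comp_count s =
      (if pvBestFrom (fun x => PySem.Int.mod x 2 = 1) 0 s
          < pvBestFrom (fun x => PySem.Int.mod x 2 = 0) 0 s then
        (if pvBestFrom (fun x => PySem.Int.mod x 2 = 1) 0 s ≠ 0 then
          (if pvBestFrom (fun x => PySem.Int.mod x 2 = 0) 0 s = 0 then 0
           else PySem.Int.truncdiv (pvBestFrom (fun x => PySem.Int.mod x 2 = 0) 0 s) 2) + 1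
         else
          (if pvBestFrom (fun x => PySem.Int.mod x 2 = 0) 0 s = 0 then 0
           else PySem.Int.truncdiv (pvBestFrom (fun x => PySem.Int.mod x 2 = 0) 0 s) 2))
       else
        (if pvBestFrom (fun x => PySem.Int.mod x 2 = 1) 0 s = 0 then 0
         else PySem.Int.floordiv (pvBestFrom (fun x => PySem.Int.mod x 2 = 1) 0 s) 2 + 1)) := by
    simp only [min_comp_count]
    rw [h3, h4, h1, h2]
  rw [h1] at h5
  rw [h2] at h6
  have hzero : (if pvBestFrom (fun x => PySem.Int.mod x 2 = 0) 0 s = 0 then 0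
      else PySem.Int.truncdiv (pvBestFrom (fun x => PySem.Int.mod x 2 = 0) 0 s) 2)
      = PySem.Int.floordiv (pvBestFrom (fun x => PySem.Int.mod x 2 = 0) 0 s) 2 := by
    rw [pvTruncdiv_eq_floordiv h5]
    split_ifs with h
    · rw [h]; decide
    · rfl
  rw [hA, hzero]
  simp only [min_comp_count_alt]
  rw [← hEe, ← hEo]
  split_ifs <;> omega
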